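-- pv_equiv track=rewrite | github.com/asad8210/E-mail-Sender | email_sender.py | extract_name_and_email
-- ===== SOURCE A (Python) =====
-- def extract_name_and_email(text):
--     name = ""
--     email = ""
--     lines = text.splitlines()
--     for line in lines:
--         if "Name" in line:
--             name = line.split(":")[-1].strip()
--         if "Email" in line:
--             email = line.split(":")[-1].strip()
--     return name, email
-- ===== SOURCE B (Python) =====
-- def extract_name_and_email(text):
--     name = ""
--     email = ""
--     found_name = False
--     found_email = False
--     for line in reversed(text.splitlines()):
--         if not found_name and "Name" in line:
--             name = line.split(":")[-1].strip()
--             found_name = True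
--         if not found_email and "Email" in line:
--             email = line.split(":")[-1].strip()
--             found_email = True
--         if found_name and found_email:
--             break
--     return name, email
-- ===== Notes on version B (the rewrite author's own statement) =====
-- stated objective: alternative
-- what changed: B scans the lines in reverse with found-flags and breaks as soon as both fields are found (first match from the end), instead of A's full forward scan overwriting with every match.
import Mathlib
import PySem

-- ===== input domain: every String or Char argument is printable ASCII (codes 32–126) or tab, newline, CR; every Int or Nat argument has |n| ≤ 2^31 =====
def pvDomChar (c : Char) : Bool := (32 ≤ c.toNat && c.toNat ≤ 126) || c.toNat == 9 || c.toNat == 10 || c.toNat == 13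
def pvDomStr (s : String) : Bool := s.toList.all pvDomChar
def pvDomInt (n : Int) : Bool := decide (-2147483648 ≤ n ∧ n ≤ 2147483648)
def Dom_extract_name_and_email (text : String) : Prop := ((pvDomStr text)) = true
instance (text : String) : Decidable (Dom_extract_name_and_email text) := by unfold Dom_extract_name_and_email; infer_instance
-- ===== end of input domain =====

-- B scans the lines in reverse with found-flags and breaks once both fields are found,
-- instead of A's full forward scan overwriting on every match; same return value.

-- shared helper: line.split(":")[-1].strip()  (split with a nonempty separator is never empty,
-- so the [-1] index never raises; the .getD "" defaults are unreachable)
def pvSplitVal (line : String) : String :=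
  PySem.Str.strip ((PySem.List.pyGet? ((PySem.Str.split? line ":").getD []) (-1)).getD "")

-- ===== PORT A =====
def extract_name_and_email (text : String) : String × String :=
  (PySem.Str.splitlines text).foldl
    (fun (st : String × String) line =>
      (if PySem.Str.isIn "Name" line then pvSplitVal line else st.1,
       if PySem.Str.isIn "Email" line then pvSplitVal line else st.2))
    ("", "")

-- ===== PORT B =====
def pvGoB : List String → String → String → Bool → Bool → String × String
  | [], n, e, _, _ => (n, e)
  | l :: rest, n, e, fn, fe =>
    let p1 : String × Bool := if !fn && PySem.Str.isIn "Name" l then (pvSplitVal l, true) else (n, fn)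
    let p2 : String × Bool := if !fe && PySem.Str.isIn "Email" l then (pvSplitVal l, true) else (e, fe)
    if p1.2 && p2.2 then (p1.1, p2.1) else pvGoB rest p1.1 p2.1 p1.2 p2.2

def extract_name_and_email_alt (text : String) : String × String :=
  pvGoB (PySem.Str.splitlines text).reverse "" "" false false

-- ===== PRECONDITION & SPEC =====
def Spec_extract_name_and_email (text : String) (out : String × String) : Prop := out = extract_name_and_email_alt text
instance (text : String) (out : String × String) : Decidable (Spec_extract_name_and_email text out) := by unfold Spec_extract_name_and_email; infer_instance

-- ===== CLAIM (what is proved, stated in full; the proofs are below) =====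
def Claim_equal_extract_name_and_email : Prop := ∀ (text : String), Dom_extract_name_and_email text → Spec_extract_name_and_email text (extract_name_and_email text)

-- ===== LEMMAS AND PROOFS =====

-- "value of the first line in ms satisfying p, else dflt"
def pvFindVal (p : String → Bool) (ms : List String) (dflt : String) : String :=
  ((ms.find? p).map pvSplitVal).getD dflt

theorem pvGoB_spec (ms : List String) : ∀ (n e : String) (fn fe : Bool),
    pvGoB ms n e fn fe =
      ((if fn then n else pvFindVal (fun l => PySem.Str.isIn "Name" l) ms n),
       (if fe then e else pvFindVal (fun l => PySem.Str.isIn "Email" l) ms e)) := by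
  induction ms with
  | nil => intro n e fn fe; simp [pvGoB, pvFindVal]
  | cons l rest ih =>
    intro n e fn fe
    simp only [pvGoB]
    by_cases hn : PySem.Str.isIn "Name" l = true <;>
      by_cases he : PySem.Str.isIn "Email" l = true <;>
        simp at hn he <;>
          cases fn <;> cases fe <;>
            simp [hn, he, ih, pvFindVal, List.find?]

theorem pvFoldl_spec (ls : List String) : ∀ (n e : String),
    ls.foldl
      (fun (st : String × String) line =>
        (if PySem.Str.isIn "Name" line then pvSplitVal line else st.1,
         if PySem.Str.isIn "Email" line then pvSplitVal line else st.2)) (n, e) =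
      (pvFindVal (fun l => PySem.Str.isIn "Name" l) ls.reverse n,
       pvFindVal (fun l => PySem.Str.isIn "Email" l) ls.reverse e) := by
  induction ls with
  | nil => intro n e; simp [pvFindVal]
  | cons l rest ih =>
    intro n e
    simp only [List.foldl_cons, ih, List.reverse_cons]
    simp only [Prod.mk.injEq]
    constructor <;>
    · simp only [pvFindVal, List.find?_append]
      cases List.find? _ rest.reverse
      · simp [List.find?]; split <;> simp_all
      · simp

-- ===== VERDICT (by name: the statement is the Claim_ definition above) =====
theorem extract_name_and_email_spec : Claim_equal_extract_name_and_email := by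
  intro text _
  unfold Spec_extract_name_and_email extract_name_and_email extract_name_and_email_alt
  rw [pvFoldl_spec, pvGoB_spec]
  simp
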